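-- pv_equiv track=rewrite | github.com/kmayerb/tcrshuffler | tcrshuffler/utils.py | best_d_alignment
-- ===== SOURCE A (Python) =====
-- from difflib import SequenceMatcher
--
-- def best_d_alignment(cdr3, cdr3_source, d_segments, min_v=4, min_j=3):
--     """
--     Try to assign a D gene match in the central region of the CDR3.
--
--     Parameters
--     ----------
--     cdr3 : str
--         Amino acid sequence of the CDR3.
--     cdr3_source : str
--         Current region labels for the CDR3.
--     d_segments : dict
--         Dictionary of D gene names to amino acid sequences.
--     min_v : int, optional
--         Number of residues to preserve at N-terminus from V. Default is 4.
--     min_j : int, optional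
--         Number of residues to preserve at C-terminus from J. Default is 3.
--
--     Returns
--     -------
--     tuple
--         (cdr3, modified_cdr3_source, best_d_sequence) where modified_cdr3_source
--         has D regions annotated and best_d_sequence is the best matching D gene.
--     """
--     core = cdr3[min_v:len(cdr3)-min_j]
--     best_match = None
--     best_score = 0
--     best_d = None
--
--     for name, d_seq in d_segments.items():
--         match = SequenceMatcher(None, core, d_seq).find_longest_match(
--             0, len(core), 0, len(d_seq)
--         )
--         if match.size > best_score:
--             best_score = match.size
--             best_match = match
--             best_d = d_seq
--
--     if best_match and best_score > 0:
--         start = min_v + best_match.a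
--         end = start + best_match.size
--         modified_source = (
--             cdr3_source[:start] +
--             "".join(['D' for x in cdr3_source[start:end]]) +
--             cdr3_source[end:]
--         )
--         return cdr3, modified_source, best_d
--     else:
--         return cdr3, cdr3_source, best_d  # no match found
-- ===== SOURCE B (Python) =====
-- def best_d_alignment(cdr3, cdr3_source, d_segments, min_v=4, min_j=3):
--     """Hand-rolled rolling-row DP (longest common substring, leftmost tie-break)
--     instead of difflib.SequenceMatcher; same outer 'strictly greater keeps first' rule."""
--     core = cdr3[min_v:len(cdr3)-min_j]
--     best_start = 0
--     best_score = 0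
--     best_d = None
--     for name, d_seq in d_segments.items():
--         start, size = _lcs_leftmost(core, d_seq)
--         if size > best_score:
--             best_score = size
--             best_start = start
--             best_d = d_seq
--     if best_score > 0:
--         start = min_v + best_start
--         end = start + best_score
--         return cdr3, cdr3_source[:start] + 'D' * len(cdr3_source[start:end]) + cdr3_source[end:], best_d
--     return cdr3, cdr3_source, best_d
--
--
-- def _lcs_leftmost(a, b):
--     """(start_in_a, length) of the longest common substring of a and b;
--     ties go to the smallest start in a.  dp[j] = run length ending at (i, j)."""
--     best_start = 0
--     best_size = 0
--     prev = [0] * len(b)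
--     for i, ca in enumerate(a):
--         cur = [0] * len(b)
--         for j, cb in enumerate(b):
--             if ca == cb:
--                 k = (prev[j - 1] if j else 0) + 1
--                 cur[j] = k
--                 if k > best_size:
--                     best_size = k
--                     best_start = i - k + 1
--         prev = cur
--     return best_start, best_size
-- ===== Notes on version B (the rewrite author's own statement) =====
-- stated objective: simpler
-- what changed: Replaces difflib.SequenceMatcher(...).find_longest_match (per-character position index b2j, j2len dict sweep, autojunk popularity filter and boundary extension loops) with a plain hand-rolled rolling-row longest-common-substring DP that tracks the maximum run length and its start in core, updating only on strictly greater length so ties stay leftmost.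
import Mathlib
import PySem

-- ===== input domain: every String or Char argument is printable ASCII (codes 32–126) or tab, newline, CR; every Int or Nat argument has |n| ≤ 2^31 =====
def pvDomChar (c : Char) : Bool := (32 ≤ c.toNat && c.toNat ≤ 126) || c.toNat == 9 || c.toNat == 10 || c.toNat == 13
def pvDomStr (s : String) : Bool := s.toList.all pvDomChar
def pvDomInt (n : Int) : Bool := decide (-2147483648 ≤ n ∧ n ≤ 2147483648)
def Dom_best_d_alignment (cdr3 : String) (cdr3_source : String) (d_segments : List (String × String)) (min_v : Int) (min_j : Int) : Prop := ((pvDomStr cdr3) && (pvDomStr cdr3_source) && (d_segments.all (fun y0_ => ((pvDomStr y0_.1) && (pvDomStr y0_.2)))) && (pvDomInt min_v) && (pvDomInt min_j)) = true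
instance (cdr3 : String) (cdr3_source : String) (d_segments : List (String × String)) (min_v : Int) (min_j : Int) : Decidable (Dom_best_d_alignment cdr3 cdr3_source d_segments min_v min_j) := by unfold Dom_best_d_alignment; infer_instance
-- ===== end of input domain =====

-- B replaces difflib.SequenceMatcher with a plain rolling-row longest-common-substring DP
-- (simpler, no library machinery); equality is proved outside Pre_'s autojunk exclusion below.

-- ===== PORT A =====
-- A calls SequenceMatcher(None, core, d_seq).find_longest_match(0, len(core), 0, len(d_seq)).
-- The library call is ported step for step from CPython's difflib: __chain_b builds
-- b2j (b2j.setdefault(elt, []).append(j)), then, since autojunk=True, deletes 'popular'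
-- entries when len(b) >= 200; isjunk is None so self.bjunk = set() and the two
-- junk-extension while-loops of find_longest_match test 'isbjunk(...)' = False: they are
-- exactly dead and omitted; the 'not isbjunk(...)' conjuncts of the first two extension
-- loops are identically True and omitted.  The 'if j < blo: continue / if j >= bhi: break'
-- guards never fire for blo=0, bhi=len(b) on the stored in-range indices and are omitted.
def pvChainB (b : List Char) : PySem.Dict Char (List Int) :=
  let b2j := (PySem.List.enumerate b).foldl
      (fun d jc => d.modify jc.2 [] (fun l => l ++ [jc.1])) PySem.Dict.empty
  if 200 ≤ b.length then
    let ntest : Int := PySem.Int.floordiv (b.length : Int) 100 + 1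
    let popular := (b2j.items.filter (fun kv => ntest < (kv.2.length : Int))).map Prod.fst
    popular.foldl (fun d c => d.erase c) b2j
  else b2j

-- one inner 'for j in b2j.get(a[i], nothing)' pass; reads the previous row's j2len (a
-- fixed argument), writes newj2len and the (besti, bestj, bestsize) triple
def pvFlmRow (b2j : PySem.Dict Char (List Int)) (j2len : PySem.Dict Int Int)
    (i : Int) (c : Char) (best : Int × Int × Int) : (Int × Int × Int) × PySem.Dict Int Int :=
  (b2j.getD c []).foldl
    (fun st j =>
      let k := j2len.getD (j - 1) 0 + 1
      let nj := st.2.insert j k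
      if st.1.2.2 < k then ((i - k + 1, j - k + 1, k), nj) else (st.1, nj))
    (best, PySem.Dict.empty)

def pvFlmMain (a b : List Char) : Int × Int × Int :=
  ((PySem.List.enumerate a).foldl
    (fun (st : (Int × Int × Int) × PySem.Dict Int Int) ic =>
      pvFlmRow (pvChainB b) st.2 ic.1 ic.2 st.1)
    ((0, 0, 0), PySem.Dict.empty)).1

-- 'while besti > alo and bestj > blo and a[besti-1] == b[bestj-1]: ...' — besti strictly
-- decreases while positive, so fuel besti.toNat is exact; the indices read are provably
-- in range in every reachable state (the .isSome conjunct is then exact)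
def pvExtLeft (a b : List Char) : Nat → Int × Int × Int → Int × Int × Int
  | 0, st => st
  | fuel + 1, (bi, bj, sz) =>
    if 0 < bi ∧ 0 < bj ∧ (PySem.List.pyGet? a (bi - 1)).isSome ∧
        PySem.List.pyGet? a (bi - 1) = PySem.List.pyGet? b (bj - 1)
    then pvExtLeft a b fuel (bi - 1, bj - 1, sz + 1) else (bi, bj, sz)

-- 'while besti+bestsize < ahi and bestj+bestsize < bhi and a[besti+bestsize] == b[bestj+bestsize]'
-- bestsize strictly increases while besti+bestsize < len(a), so fuel len(a) is exact
def pvExtRight (a b : List Char) : Nat → Int × Int × Int → Int × Int × Int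
  | 0, st => st
  | fuel + 1, (bi, bj, sz) =>
    if bi + sz < (a.length : Int) ∧ bj + sz < (b.length : Int) ∧
        PySem.List.pyGet? a (bi + sz) = PySem.List.pyGet? b (bj + sz)
    then pvExtRight a b fuel (bi, bj, sz + 1) else (bi, bj, sz)

def pvFlm (a b : List Char) : Int × Int × Int :=
  let st := pvFlmMain a b
  pvExtRight a b a.length (pvExtLeft a b st.1.toNat st)

def best_d_alignment (cdr3 : String) (cdr3_source : String) (d_segments : List (String × String)) (min_v : Int) (min_j : Int) : String × String × Option String :=
  let core := PySem.List.slice cdr3.toList (some min_v) (some ((cdr3.toList.length : Int) - min_j))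
  let st := d_segments.foldl
    (fun (st : Option (Int × Int × Int) × Int × Option String) nd =>
      let m := pvFlm core nd.2.toList
      if st.2.1 < m.2.2 then (some m, m.2.2, some nd.2) else st)
    (none, 0, none)
  match st.1 with
  | some mt =>
    if 0 < st.2.1 then
      let src := cdr3_source.toList
      let start := min_v + mt.1
      let fin := start + st.2.1
      (cdr3, String.ofList (PySem.List.slice src none (some start) ++
        (PySem.List.slice src (some start) (some fin)).map (fun _ => 'D') ++
        PySem.List.slice src (some fin) none), st.2.2)
    else (cdr3, cdr3_source, st.2.2)
  | none => (cdr3, cdr3_source, st.2.2)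

-- ===== PORT B =====
-- one row of the rolling DP: cur[j] = run length ending at (i, j), best kept on strictly
-- greater length only ('prev[j-1] if j else 0' guards j = 0 explicitly)
def pvLcsRow (b : List Char) (i : Int) (ca : Char) (prev : List Int) (bs bst : Int) :
    List Int × Int × Int :=
  (PySem.List.enumerate b).foldl
    (fun (st : List Int × Int × Int) jc =>
      if ca = jc.2 then
        let k := (if jc.1 = 0 then 0 else PySem.List.pyGetD prev (jc.1 - 1) 0) + 1
        let cur := PySem.List.pySetD st.1 jc.1 k
        if st.2.1 < k then (cur, k, i - k + 1) else (cur, st.2.1, st.2.2)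
      else st)
    (List.replicate b.length 0, bs, bst)

def pvLcs (a b : List Char) : Int × Int :=
  let st := (PySem.List.enumerate a).foldl
    (fun (st : List Int × Int × Int) ic => pvLcsRow b ic.1 ic.2 st.1 st.2.1 st.2.2)
    (List.replicate b.length 0, 0, 0)
  (st.2.2, st.2.1)

def best_d_alignment_alt (cdr3 : String) (cdr3_source : String) (d_segments : List (String × String)) (min_v : Int) (min_j : Int) : String × String × Option String :=
  let core := PySem.List.slice cdr3.toList (some min_v) (some ((cdr3.toList.length : Int) - min_j))
  let st := d_segments.foldl
    (fun (st : Int × Int × Option String) nd =>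
      let r := pvLcs core nd.2.toList
      if st.2.1 < r.2 then (r.1, r.2, some nd.2) else st)
    (0, 0, none)
  if 0 < st.2.1 then
    let src := cdr3_source.toList
    let start := min_v + st.1
    let fin := start + st.2.1
    (cdr3, String.ofList (PySem.List.slice src none (some start) ++
      List.replicate (PySem.List.slice src (some start) (some fin)).length 'D' ++
      PySem.List.slice src (some fin) none), st.2.2)
  else (cdr3, cdr3_source, st.2.2)

-- ===== PRECONDITION & SPEC =====
-- Pre_ excludes inputs where some D segment is 200+ characters long with one character
-- more frequent than len//100 + 1: there difflib's autojunk heuristic silently drops that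
-- character from matching — an implementation artefact of A that B does not reproduce.
def Pre_best_d_alignment (cdr3 : String) (cdr3_source : String) (d_segments : List (String × String)) (min_v : Int) (min_j : Int) : Prop :=
  ∀ p ∈ d_segments, p.2.toList.length < 200 ∨
    ∀ c ∈ p.2.toList, p.2.toList.count c ≤ p.2.toList.length / 100 + 1
instance (cdr3 : String) (cdr3_source : String) (d_segments : List (String × String)) (min_v : Int) (min_j : Int) : Decidable (Pre_best_d_alignment cdr3 cdr3_source d_segments min_v min_j) := by unfold Pre_best_d_alignment; infer_instance

def pvWitness_best_d_alignment : String × String × (List (String × String)) × Int × Int :=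
  ("VVVVABCJJJ", "xxxxxxxxxx", [("d1", "ABC")], 4, 3)

def Spec_best_d_alignment (cdr3 : String) (cdr3_source : String) (d_segments : List (String × String)) (min_v : Int) (min_j : Int) (out : String × String × Option String) : Prop := out = best_d_alignment_alt cdr3 cdr3_source d_segments min_v min_j
instance (cdr3 : String) (cdr3_source : String) (d_segments : List (String × String)) (min_v : Int) (min_j : Int) (out : String × String × Option String) : Decidable (Spec_best_d_alignment cdr3 cdr3_source d_segments min_v min_j out) := by unfold Spec_best_d_alignment; infer_instance

-- ===== CLAIM (what is proved, stated in full; the proofs are below) =====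
def Claim_equal_best_d_alignment : Prop := ∀ (cdr3 : String) (cdr3_source : String) (d_segments : List (String × String)) (min_v : Int) (min_j : Int), Dom_best_d_alignment cdr3 cdr3_source d_segments min_v min_j → Pre_best_d_alignment cdr3 cdr3_source d_segments min_v min_j → Spec_best_d_alignment cdr3 cdr3_source d_segments min_v min_j (best_d_alignment cdr3 cdr3_source d_segments min_v min_j)

-- ===== LEMMAS AND PROOFS =====

-- exact run length of the common substring ending at (i, j) ('the DP value')
def pvMtc (a b : List Char) (i j : Nat) : Bool := a[i]?.isSome && (a[i]? == b[j]?)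

def pvDp (a b : List Char) : Nat → Nat → Int
  | 0, _j => if pvMtc a b 0 _j then 1 else 0
  | i + 1, 0 => if pvMtc a b (i + 1) 0 then 1 else 0
  | i + 1, j + 1 => if pvMtc a b (i + 1) (j + 1) then pvDp a b i j + 1 else 0

-- the row that precedes row i (all-zero before row 0)
def pvPr (a b : List Char) (i j : Nat) : Int := if i = 0 then 0 else pvDp a b (i - 1) j

-- abstract per-row best-update, the common skeleton of both inner loops
def pvAbsRowUpTo (a b : List Char) (i s : Nat) (st : Int × Int × Int) : Int × Int × Int :=
  (List.range s).foldl
    (fun st j => if st.2.2 < pvDp a b i j then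
        ((i : Int) - pvDp a b i j + 1, (j : Int) - pvDp a b i j + 1, pvDp a b i j) else st) st

def pvAbsUpTo (a b : List Char) (t : Nat) : Int × Int × Int :=
  (List.range t).foldl (fun st i => pvAbsRowUpTo a b i b.length st) (0, 0, 0)

def pvAbs (a b : List Char) : Int × Int × Int := pvAbsUpTo a b a.length

-- the (size, start)-projection of the abstract row (what B maintains)
def pvAbsRow2 (a b : List Char) (i s : Nat) (p : Int × Int) : Int × Int :=
  (List.range s).foldl
    (fun p j => if p.1 < pvDp a b i j then (pvDp a b i j, (i : Int) - pvDp a b i j + 1) else p) p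

-- the dict of the A loop / the list row of the B loop encode a row function
def pvDEnc (d : PySem.Dict Int Int) (g : Nat → Int) : Prop :=
  ∀ x : Int, d.getD x 0 = if 0 ≤ x then g x.toNat else 0

def pvLEnc (l : List Int) (g : Nat → Int) (m : Nat) : Prop :=
  l.length = m ∧ ∀ j, j < m → PySem.List.pyGetD l (j : Int) 0 = g j


-- generic: fold two loops in lock-step through a relation
theorem pv_foldl_rel {σ τ α : Type*} (R : σ → τ → Prop) (f : σ → α → σ) (g : τ → α → τ)
    (l : List α) (s : σ) (t : τ) (h : R s t)
    (hstep : ∀ s t x, x ∈ l → R s t → R (f s x) (g t x)) :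
    R (l.foldl f s) (l.foldl g t) := by
  induction l generalizing s t with
  | nil => exact h
  | cons x xs ih =>
    exact ih _ _ (hstep s t x (by simp) h) (fun s t y hy => hstep s t y (by simp [hy]))

-- generic: invariant-carrying pointwise congruence of folds
theorem pv_foldl_inv_congr {σ α : Type*} (P : σ → Prop) (f g : σ → α → σ)
    (l : List α) (s : σ) (h0 : P s)
    (hP : ∀ s x, x ∈ l → P s → P (g s x))
    (he : ∀ s x, x ∈ l → P s → f s x = g s x) :
    l.foldl f s = l.foldl g s := by
  induction l generalizing s with
  | nil => rfl
  | cons x xs ih =>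
    rw [List.foldl_cons, List.foldl_cons, he s x (by simp) h0]
    exact ih _ (hP s x (by simp) h0) (fun s y hy => hP s y (by simp [hy]))
      (fun s y hy => he s y (by simp [hy]))

-- generic: induction along a fold over List.range
theorem pv_range_fold_ind {σ : Type*} (P : Nat → σ → Prop) (f : σ → Nat → σ) (n : Nat)
    (init : σ) (h0 : P 0 init) (hstep : ∀ t st, t < n → P t st → P (t + 1) (f st t)) :
    P n ((List.range n).foldl f init) := by
  induction n with
  | zero => exact h0
  | succ n ih =>
    rw [List.range_succ, List.foldl_append]
    exact hstep n _ (Nat.lt_succ_self n)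
      (ih (fun t st ht hp => hstep t st (Nat.lt_succ_of_lt ht) hp))

theorem pvDp_z (a b : List Char) (j : Nat) :
    pvDp a b 0 j = if pvMtc a b 0 j then 1 else 0 := rfl
theorem pvDp_s0 (a b : List Char) (i : Nat) :
    pvDp a b (i + 1) 0 = if pvMtc a b (i + 1) 0 then 1 else 0 := rfl
theorem pvDp_ss (a b : List Char) (i j : Nat) :
    pvDp a b (i + 1) (j + 1) = if pvMtc a b (i + 1) (j + 1) then pvDp a b i j + 1 else 0 := rfl

theorem pvDp_nonneg (a b : List Char) (i j : Nat) : 0 ≤ pvDp a b i j := by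
  match i, j with
  | 0, j => rw [pvDp_z]; split <;> omega
  | i + 1, 0 => rw [pvDp_s0]; split <;> omega
  | i + 1, j + 1 =>
    have := pvDp_nonneg a b i j
    rw [pvDp_ss]; split <;> omega

theorem pvDp_row (a b : List Char) (i j : Nat) :
    pvDp a b i j = if pvMtc a b i j then (if j = 0 then 0 else pvPr a b i (j - 1)) + 1 else 0 := by
  match i, j with
  | 0, j => rw [pvDp_z]; simp only [pvPr, if_pos rfl]; split <;> simp
  | i + 1, 0 => rw [pvDp_s0]; simp [pvPr]
  | i + 1, j + 1 => rw [pvDp_ss]; simp [pvPr]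

theorem pvDp_pos_iff (a b : List Char) (i j : Nat) : 0 < pvDp a b i j ↔ pvMtc a b i j := by
  rw [pvDp_row]
  have h1 : (0:Int) ≤ (if j = 0 then 0 else pvPr a b i (j - 1)) := by
    unfold pvPr
    split
    · omega
    · split
      · omega
      · exact pvDp_nonneg a b _ _
  constructor
  · intro h; by_contra hm; simp [hm] at h
  · intro hm; simp [hm]; omega

theorem pvDp_succ_succ (a b : List Char) (i j : Nat) (h : pvMtc a b (i + 1) (j + 1)) :
    pvDp a b (i + 1) (j + 1) = pvDp a b i j + 1 := by
  rw [pvDp_ss]; simp [h]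

-- a dp value ≥ 2 comes from the diagonal predecessor
theorem pvDp_pred (a b : List Char) (i j : Nat) (h : 2 ≤ pvDp a b i j) :
    ∃ i' j', i = i' + 1 ∧ j = j' + 1 ∧ pvDp a b i' j' = pvDp a b i j - 1 := by
  match i, j with
  | 0, j => rw [pvDp_z] at h; split at h <;> omega
  | i + 1, 0 => rw [pvDp_s0] at h; split at h <;> omega
  | i + 1, j + 1 =>
    refine ⟨i, j, rfl, rfl, ?_⟩
    rw [pvDp_ss] at h ⊢
    split at h
    · simp_all
    · omega

-- descend t steps along the recorded run
theorem pvDp_sub (a b : List Char) (i j : Nat) (k : Int) (hk : pvDp a b i j = k) :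
    ∀ t : Nat, (t : Int) < k → t ≤ i ∧ t ≤ j ∧ pvDp a b (i - t) (j - t) = k - t := by
  intro t
  induction t generalizing i j k with
  | zero => intro _; simpa using hk
  | succ t ih =>
    intro ht
    have h2 : 2 ≤ pvDp a b i j := by omega
    obtain ⟨i', j', rfl, rfl, hd⟩ := pvDp_pred a b i j h2
    have := ih i' j' (k - 1) (by omega) (by omega)
    refine ⟨by omega, by omega, ?_⟩
    have e1 : i' + 1 - (t + 1) = i' - t := by omega
    have e2 : j' + 1 - (t + 1) = j' - t := by omega
    rw [e1, e2]
    omega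


-- ascending positions of character c in b
def pvPos (b : List Char) (c : Char) : List Nat :=
  (List.range b.length).filter (fun j => b[j]? == some c)

def pvOkSeg (b : List Char) : Prop :=
  b.length < 200 ∨ ∀ c ∈ b, b.count c ≤ b.length / 100 + 1

theorem pv_countP_range (b : List Char) (c : Char) :
    (List.range b.length).countP (fun j => b[j]? == some c) = b.count c := by
  induction b using List.reverseRecOn with
  | nil => simp
  | append_singleton l x ih =>
    rw [List.length_append, List.length_singleton, List.range_succ, List.countP_append,
      List.count_append]
    have h1 : (List.range l.length).countP (fun j => (l ++ [x])[j]? == some c)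
        = (List.range l.length).countP (fun j => l[j]? == some c) := by
      apply List.countP_congr
      intro j hj
      rw [List.getElem?_append_left (by simpa using (List.mem_range.mp hj))]
    have h2 : (l ++ [x])[l.length]? = some x := by
      simp
    rw [h1, ih]
    have : List.countP (fun j => (l ++ [x])[j]? == some c) [l.length] = List.count c [x] := by
      simp [List.countP, List.countP.go]
      have hb : (x == c) = decide (x = c) := rfl
      by_cases hxc : x = c <;> simp [hxc, hb]
    omega

theorem pvPos_length (b : List Char) (c : Char) : (pvPos b c).length = b.count c := by
  rw [pvPos, ← List.countP_eq_length_filter, pv_countP_range]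

-- the base b2j dict: positions of each character
theorem pvB2J0_getD (b : List Char) (c : Char) :
    ((PySem.List.enumerate b).foldl
        (fun d jc => d.modify jc.2 [] (fun l => l ++ [jc.1])) PySem.Dict.empty).getD c []
      = (pvPos b c).map (fun j : Nat => (j : Int)) := by
  have hswap : (PySem.List.enumerate b).foldl
        (fun d jc => d.modify jc.2 [] (fun l => l ++ [jc.1])) (PySem.Dict.empty (κ := Char) (ν := List Int))
      = ((PySem.List.enumerate b).map (fun jc => (jc.2, jc.1))).foldl
        (fun d p => d.modify p.1 [] (fun l => l ++ [p.2])) PySem.Dict.empty := by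
    rw [List.foldl_map]
  rw [hswap, PySem.Dict.getD_foldl_modify_append]
  rw [PySem.Dict.getD_empty, List.nil_append]
  rw [PySem.List.enumerate_eq_map_pyRange b 'A', PySem.List.len_eq, PySem.List.pyRange_zero_natCast]
  rw [List.map_map, List.map_map, List.filter_map, List.map_map]
  simp only [Function.comp_def]
  have : List.filter (fun (k:Nat) => PySem.List.pyGetD b (↑k) 'A' == c) (List.range b.length)
      = List.filter (fun (j:Nat) => b[j]? == some c) (List.range b.length) := by
    apply List.filter_congr
    intro j hj
    have hj' : j < b.length := List.mem_range.mp hj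
    rw [PySem.List.pyGetD_natCast, List.getD_eq_getElem _ _ hj', List.getElem?_eq_getElem hj']
    simp
  rw [pvPos, this]

theorem pvChainB_getD (b : List Char) (hb : pvOkSeg b) (c : Char) :
    (pvChainB b).getD c [] = (pvPos b c).map (fun j : Nat => (j : Int)) := by
  unfold pvChainB
  simp only []
  by_cases h200 : 200 ≤ b.length
  · rw [if_pos h200]
    have hcnt : ∀ c ∈ b, b.count c ≤ b.length / 100 + 1 := by
      rcases hb with h | h
      · omega
      · exact h
    have hnodup : ((PySem.List.enumerate b).foldl
        (fun d jc => d.modify jc.2 [] (fun l => l ++ [jc.1]))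
        (PySem.Dict.empty (κ := Char) (ν := List Int))).keys.Nodup := by
      exact PySem.Dict.nodup_keys_foldl_modify_key (PySem.List.enumerate b)
        (fun jc : Int × Char => jc.2) [] (fun d jc => (fun l => l ++ [jc.1]))
        PySem.Dict.empty PySem.Dict.nodup_keys_empty
    have hpop : (((PySem.List.enumerate b).foldl
          (fun d jc => d.modify jc.2 [] (fun l => l ++ [jc.1]))
          (PySem.Dict.empty (κ := Char) (ν := List Int))).items.filter
          (fun kv => PySem.Int.floordiv (b.length : Int) 100 + 1 < (kv.2.length : Int))) = [] := by
      rw [List.filter_eq_nil_iff]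
      rintro ⟨k, v⟩ hkv
      have hv : v = (pvPos b k).map (fun j : Nat => (j : Int)) := by
        have := PySem.Dict.getD_of_mem_items _ hkv hnodup []
        rw [pvB2J0_getD] at this
        exact this.symm
      have hlen : v.length = b.count k := by
        rw [hv]
        simp [pvPos_length]
      have hck : b.count k ≤ b.length / 100 + 1 := by
        by_cases hmem : k ∈ b
        · exact hcnt k hmem
        · rw [List.count_eq_zero_of_not_mem hmem]; omega
      simp only [decide_eq_true_eq, not_lt]
      have : PySem.Int.floordiv (b.length : Int) 100 = ((b.length / 100 : Nat) : Int) :=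
        PySem.Int.floordiv_natCast b.length 100
      rw [this, hlen]
      exact_mod_cast hck
    rw [hpop]
    simp only [List.map_nil, List.foldl_nil]
    exact pvB2J0_getD b c
  · rw [if_neg h200]
    exact pvB2J0_getD b c


theorem pv_foldl_insert_getD (js : List Nat) (k : Nat → Int) (d : PySem.Dict Int Int) (x : Int) :
    (js.foldl (fun d j => d.insert (j : Int) (k j)) d).getD x 0
      = if ∃ j ∈ js, (j : Int) = x then k x.toNat else d.getD x 0 := by
  induction js generalizing d with
  | nil => simp
  | cons j js ih =>
    rw [List.foldl_cons, ih]
    by_cases hx : ∃ j' ∈ js, (j' : Int) = x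
    · rw [if_pos hx, if_pos ⟨hx.choose, List.mem_cons_of_mem _ hx.choose_spec.1, hx.choose_spec.2⟩]
    · rw [if_neg hx, PySem.Dict.getD_insert]
      by_cases he : x = (j : Int)
      · subst he
        rw [if_pos rfl, if_pos ⟨j, List.mem_cons_self .., rfl⟩, Int.toNat_natCast]
      · rw [if_neg he, if_neg]
        rintro ⟨j', hj', he'⟩
        rcases List.mem_cons.mp hj' with rfl | hm
        · exact he he'.symm
        · exact hx ⟨j', hm, he'⟩

theorem pvAbsRowUpTo_nonneg (a b : List Char) (i s : Nat) (st : Int × Int × Int)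
    (h : 0 ≤ st.2.2) : 0 ≤ (pvAbsRowUpTo a b i s st).2.2 := by
  unfold pvAbsRowUpTo
  refine pv_range_fold_ind (fun _ st => 0 ≤ st.2.2) _ s st h ?_
  intro t st _ hp
  by_cases hlt : st.2.2 < pvDp a b i t
  · simp [hlt]
    omega
  · simp [hlt]
    exact hp

theorem pvAbsRow2_proj (a b : List Char) (i s : Nat) (st : Int × Int × Int) :
    pvAbsRow2 a b i s (st.2.2, st.1)
      = ((pvAbsRowUpTo a b i s st).2.2, (pvAbsRowUpTo a b i s st).1) := by
  unfold pvAbsRow2 pvAbsRowUpTo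
  exact pv_foldl_rel (fun (t : Int × Int × Int) (p : Int × Int) => p = (t.2.2, t.1))
    (fun st j => if st.2.2 < pvDp a b i j then
        ((i : Int) - pvDp a b i j + 1, (j : Int) - pvDp a b i j + 1, pvDp a b i j) else st)
    (fun p j => if p.1 < pvDp a b i j then (pvDp a b i j, (i : Int) - pvDp a b i j + 1) else p)
    (List.range s) st (st.2.2, st.1) rfl
    (fun t p j _ hr => by
      subst hr
      by_cases hlt : t.2.2 < pvDp a b i j <;> simp [hlt])

-- membership in pvPos
theorem pv_mem_pvPos (b : List Char) (c : Char) (j : Nat) :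
    j ∈ pvPos b c ↔ j < b.length ∧ b[j]? = some c := by
  simp [pvPos, List.mem_filter, List.mem_range]

-- the inner-loop value k at a matched position is the dp value
theorem pv_k_eq_dp (a b : List Char) (i : Nat) (c : Char) (hc : a[i]? = some c)
    (j2len : PySem.Dict Int Int) (hd : pvDEnc j2len (pvPr a b i))
    (j : Nat) (hj : b[j]? = some c) :
    j2len.getD ((j : Int) - 1) 0 + 1 = pvDp a b i j := by
  have hm : pvMtc a b i j := by
    simp [pvMtc, hc, hj]
  rw [pvDp_row, if_pos hm]
  rcases Nat.eq_zero_or_pos j with rfl | hjpos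
  · rw [hd]
    norm_num
  · have he : ((j : Int) - 1) = ((j - 1 : Nat) : Int) := by omega
    rw [he, hd]
    have : (0:Int) ≤ ((j - 1 : Nat) : Int) := by positivity
    rw [if_pos this]
    simp [hjpos, Nat.pos_iff_ne_zero.mp hjpos]

theorem pv_dp_zero_of_not_match (a b : List Char) (i : Nat) (c : Char) (hc : a[i]? = some c)
    (j : Nat) (hj : b[j]? ≠ some c) : pvDp a b i j = 0 := by
  have hm : ¬ pvMtc a b i j = true := by
    unfold pvMtc
    rw [hc]
    simp [beq_iff_eq]
    exact fun h => hj h.symm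
  rw [pvDp_row, if_neg hm]

-- ===== the A inner loop equals the abstract row =====
theorem pvFlmRow_eq (a b : List Char) (hb : pvOkSeg b) (i : Nat) (c : Char)
    (hc : a[i]? = some c) (j2len : PySem.Dict Int Int) (best : Int × Int × Int)
    (hd : pvDEnc j2len (pvPr a b i)) (h0 : 0 ≤ best.2.2) :
    (pvFlmRow (pvChainB b) j2len (i : Int) c best).1 = pvAbsRowUpTo a b i b.length best ∧
    pvDEnc (pvFlmRow (pvChainB b) j2len (i : Int) c best).2 (pvDp a b i) := by
  unfold pvFlmRow
  rw [pvChainB_getD b hb c, List.foldl_map]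
  have hsplit : ∀ (js : List Nat) (best : Int × Int × Int) (dacc : PySem.Dict Int Int),
      (List.foldl (fun (st : (Int × Int × Int) × PySem.Dict Int Int) (j : Nat) =>
        let k := j2len.getD ((j : Int) - 1) 0 + 1
        let nj := st.2.insert (j : Int) k
        if st.1.2.2 < k then (((i : Int) - k + 1, (j : Int) - k + 1, k), nj) else (st.1, nj))
        (best, dacc) js)
      = (js.foldl (fun st (j : Nat) =>
            if st.2.2 < j2len.getD ((j : Int) - 1) 0 + 1 then
              ((i : Int) - (j2len.getD ((j : Int) - 1) 0 + 1) + 1,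
               (j : Int) - (j2len.getD ((j : Int) - 1) 0 + 1) + 1,
               j2len.getD ((j : Int) - 1) 0 + 1) else st) best,
         js.foldl (fun d (j : Nat) => d.insert (j : Int) (j2len.getD ((j : Int) - 1) 0 + 1)) dacc) := by
    intro js
    induction js with
    | nil => intro best dacc; rfl
    | cons j js ih =>
      intro best dacc
      rw [List.foldl_cons, List.foldl_cons, List.foldl_cons]
      dsimp only
      by_cases hlt : best.2.2 < j2len.getD ((j : Int) - 1) 0 + 1
      · rw [if_pos hlt, if_pos hlt, ih]
      · rw [if_neg hlt, if_neg hlt, ih]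
  rw [hsplit]
  constructor
  · -- best component
    show _ = pvAbsRowUpTo a b i b.length best
    unfold pvPos pvAbsRowUpTo
    rw [List.foldl_filter]
    apply pv_foldl_inv_congr (fun st => 0 ≤ st.2.2)
    · exact h0
    · intro st j _ hp
      dsimp only []
      split
      · simpa using le_of_lt (lt_of_le_of_lt hp (by assumption))
      · exact hp
    · intro st j hjr hp
      have hj : j < b.length := List.mem_range.mp hjr
      by_cases hm : b[j]? = some c
      · have hpj : (b[j]? == some c) = true := by simp [hm]
        rw [if_pos hpj, pv_k_eq_dp a b i c hc j2len hd j hm]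
      · have hpj : (b[j]? == some c) = false := by simp [hm]
        rw [if_neg (by simp [hpj])]
        have hz := pv_dp_zero_of_not_match a b i c hc j hm
        rw [hz, if_neg (by omega)]
  · -- dict component
    intro x
    rw [pv_foldl_insert_getD]
    by_cases hx : ∃ j ∈ pvPos b c, (j : Int) = x
    · rw [if_pos hx]
      obtain ⟨j, hj, rfl⟩ := hx
      rw [pv_mem_pvPos] at hj
      rw [if_pos (by positivity)]
      rw [Int.toNat_natCast]
      exact pv_k_eq_dp a b i c hc j2len hd j hj.2
    · rw [if_neg hx, PySem.Dict.getD_empty]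
      by_cases hge : 0 ≤ x
      · rw [if_pos hge]
        by_cases hm : b[x.toNat]? = some c
        · exfalso
          apply hx
          refine ⟨x.toNat, ?_, by omega⟩
          rw [pv_mem_pvPos]
          refine ⟨?_, hm⟩
          by_contra hlen
          rw [List.getElem?_eq_none (by omega)] at hm
          simp at hm
        · exact (pv_dp_zero_of_not_match a b i c hc x.toNat hm).symm
      · rw [if_neg hge]


theorem pvAbsRow2_succ (a b : List Char) (i s : Nat) (p : Int × Int) :
    pvAbsRow2 a b i (s + 1) p
      = (if (pvAbsRow2 a b i s p).1 < pvDp a b i s then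
          (pvDp a b i s, (i : Int) - pvDp a b i s + 1) else pvAbsRow2 a b i s p) := by
  unfold pvAbsRow2
  rw [List.range_succ, List.foldl_append]
  rfl

theorem pvAbsUpTo_succ (a b : List Char) (t : Nat) :
    pvAbsUpTo a b (t + 1) = pvAbsRowUpTo a b t b.length (pvAbsUpTo a b t) := by
  unfold pvAbsUpTo
  rw [List.range_succ, List.foldl_append]
  rfl

-- ===== the B inner loop equals the abstract row (projection) =====
theorem pvLcsRow_eq (a b : List Char) (i : Nat) (c : Char) (hc : a[i]? = some c)
    (prev : List Int) (bs bst : Int) (hp : pvLEnc prev (pvPr a b i) b.length) (h0 : 0 ≤ bs) :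
    pvLEnc (pvLcsRow b (i : Int) c prev bs bst).1 (pvDp a b i) b.length ∧
    (pvLcsRow b (i : Int) c prev bs bst).2 = pvAbsRow2 a b i b.length (bs, bst) := by
  unfold pvLcsRow
  rw [PySem.List.enumerate_eq_map_pyRange b 'A', PySem.List.len_eq,
    PySem.List.pyRange_zero_natCast, List.foldl_map, List.foldl_map]
  have h := pv_range_fold_ind (fun s (st : List Int × Int × Int) =>
      st.1.length = b.length ∧
      (∀ j0, j0 < s → PySem.List.pyGetD st.1 (j0 : Int) 0 = pvDp a b i j0) ∧
      (∀ j0, s ≤ j0 → j0 < b.length → PySem.List.pyGetD st.1 (j0 : Int) 0 = 0) ∧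
      st.2 = pvAbsRow2 a b i s (bs, bst) ∧ 0 ≤ st.2.1)
    (fun st (j : Nat) =>
      if c = PySem.List.pyGetD b (j : Int) 'A' then
        if st.2.1 < (if (j : Int) = 0 then 0 else PySem.List.pyGetD prev ((j : Int) - 1) 0) + 1 then
          (PySem.List.pySetD st.1 (j : Int)
              ((if (j : Int) = 0 then 0 else PySem.List.pyGetD prev ((j : Int) - 1) 0) + 1),
            (if (j : Int) = 0 then 0 else PySem.List.pyGetD prev ((j : Int) - 1) 0) + 1,
            (i : Int) - ((if (j : Int) = 0 then 0 else PySem.List.pyGetD prev ((j : Int) - 1) 0) + 1) + 1)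
        else
          (PySem.List.pySetD st.1 (j : Int)
              ((if (j : Int) = 0 then 0 else PySem.List.pyGetD prev ((j : Int) - 1) 0) + 1),
            st.2.1, st.2.2)
      else st)
    b.length (List.replicate b.length 0, bs, bst)
    ⟨by simp, by omega, by
        intro j0 _ hj0
        rw [PySem.List.pyGetD_natCast]
        simp, rfl, h0⟩
    ?_
  · obtain ⟨hl, h2, _, h4, _⟩ := h
    exact ⟨⟨hl, fun j hj => h2 j hj⟩, h4⟩
  · intro t st ht hS
    dsimp only
    obtain ⟨hl, h2, h3, h4, h5⟩ := hS
    have hbt : PySem.List.pyGetD b (t : Int) 'A' = b[t] := by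
      rw [PySem.List.pyGetD_natCast, List.getD_eq_getElem _ _ ht]
    by_cases heq : c = PySem.List.pyGetD b (t : Int) 'A'
    · -- matched column
      have hmt : pvMtc a b i t := by
        have : b[t]? = some c := by
          rw [List.getElem?_eq_getElem ht, ← hbt, heq]
        simp [pvMtc, hc, this]
      have hk : (if (t : Int) = 0 then 0 else PySem.List.pyGetD prev ((t : Int) - 1) 0) + 1
          = pvDp a b i t := by
        rw [pvDp_row, if_pos hmt]
        rcases Nat.eq_zero_or_pos t with rfl | htpos
        · norm_num
        · rw [if_neg (by omega), if_neg (by omega)]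
          have he : ((t : Int) - 1) = ((t - 1 : Nat) : Int) := by omega
          rw [he, hp.2 (t - 1) (by omega)]
      have hcur : ∀ (j0 : Nat), j0 < b.length →
          PySem.List.pyGetD (PySem.List.pySetD st.1
              (t : Int) ((if (t : Int) = 0 then 0 else PySem.List.pyGetD prev ((t : Int) - 1) 0) + 1))
            (j0 : Int) 0
          = if j0 = t then pvDp a b i t else PySem.List.pyGetD st.1 (j0 : Int) 0 := by
        intro j0 hj0
        rw [PySem.List.pyGetD_pySetD_natCast st.1 t j0 _ 0 (by omega), hk]
      have hlen : (PySem.List.pySetD st.1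
          (t : Int) ((if (t : Int) = 0 then 0 else PySem.List.pyGetD prev ((t : Int) - 1) 0) + 1)).length
          = b.length := by
        rw [PySem.List.length_pySetD, hl]
      by_cases hlt : st.2.1 < (if (t : Int) = 0 then 0 else PySem.List.pyGetD prev ((t : Int) - 1) 0) + 1
      · rw [if_pos heq, if_pos hlt]
        refine ⟨hlen, ?_, ?_, ?_, by
          rw [hk]
          have := pvDp_nonneg a b i t
          omega⟩
        · intro j0 hj0
          rw [hcur j0 (by omega)]
          by_cases hjt : j0 = t
          · simp [hjt]
          · rw [if_neg hjt]
            exact h2 j0 (by omega)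
        · intro j0 hj0 hj0m
          rw [hcur j0 hj0m, if_neg (by omega)]
          exact h3 j0 (by omega) hj0m
        · have hlt' : st.2.1 < pvDp a b i t := by rw [← hk]; exact hlt
          rw [pvAbsRow2_succ, ← h4, hk, if_pos hlt']
      · rw [if_pos heq, if_neg hlt]
        refine ⟨hlen, ?_, ?_, ?_, h5⟩
        · intro j0 hj0
          rw [hcur j0 (by omega)]
          by_cases hjt : j0 = t
          · simp [hjt]
          · rw [if_neg hjt]
            exact h2 j0 (by omega)
        · intro j0 hj0 hj0m
          rw [hcur j0 hj0m, if_neg (by omega)]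
          exact h3 j0 (by omega) hj0m
        · have hlt' : ¬ st.2.1 < pvDp a b i t := by rw [← hk]; exact hlt
          rw [pvAbsRow2_succ, ← h4, if_neg hlt']
    · -- unmatched column: everything is unchanged
      have hdz : pvDp a b i t = 0 := by
        apply pv_dp_zero_of_not_match a b i c hc
        rw [List.getElem?_eq_getElem ht]
        intro hsome
        apply heq
        rw [hbt]
        exact (Option.some_injective _ hsome).symm
      rw [if_neg heq]
      refine ⟨hl, ?_, fun j0 hj0 hj0m => h3 j0 (by omega) hj0m, ?_, h5⟩
      · intro j0 hj0
        by_cases hjt : j0 = t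
        · subst hjt
          rw [h3 j0 (by omega) ht, hdz]
        · exact h2 j0 (by omega)
      · rw [pvAbsRow2_succ, ← h4, hdz, if_neg (by omega)]

-- ===== the A main loop equals the abstract loop =====
theorem pvFlmMain_eq (a b : List Char) (hb : pvOkSeg b) : pvFlmMain a b = pvAbs a b := by
  unfold pvFlmMain
  rw [PySem.List.enumerate_eq_map_pyRange a 'A', PySem.List.len_eq,
    PySem.List.pyRange_zero_natCast, List.foldl_map, List.foldl_map]
  have h := pv_range_fold_ind (fun t (st : (Int × Int × Int) × PySem.Dict Int Int) =>
      st.1 = pvAbsUpTo a b t ∧ pvDEnc st.2 (pvPr a b t) ∧ 0 ≤ st.1.2.2)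
    (fun st (i0 : Nat) =>
      pvFlmRow (pvChainB b) st.2 (i0 : Int) (PySem.List.pyGetD a (i0 : Int) 'A') st.1)
    a.length ((0, 0, 0), PySem.Dict.empty)
    ⟨rfl, by
        intro x
        rw [PySem.Dict.getD_empty]
        simp [pvPr], by norm_num⟩
    ?_
  · exact h.1
  · intro t st ht hS
    dsimp only
    obtain ⟨h1, h2, h3⟩ := hS
    have hat : PySem.List.pyGetD a (t : Int) 'A' = a[t] := by
      rw [PySem.List.pyGetD_natCast, List.getD_eq_getElem _ _ ht]
    have hc : a[t]? = some (PySem.List.pyGetD a (t : Int) 'A') := by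
      rw [hat, List.getElem?_eq_getElem ht]
    have hrow := pvFlmRow_eq a b hb t (PySem.List.pyGetD a (t : Int) 'A') hc st.2 st.1 h2 h3
    refine ⟨?_, ?_, ?_⟩
    · rw [hrow.1, h1, pvAbsUpTo_succ]
    · intro x
      rw [hrow.2 x]
      simp [pvPr]
    · rw [hrow.1, h1]
      exact pvAbsRowUpTo_nonneg a b t b.length _ (by rw [← h1]; exact h3)

-- ===== the B main loop equals the abstract loop (projection) =====
theorem pvLcs_eq (a b : List Char) : pvLcs a b = ((pvAbs a b).1, (pvAbs a b).2.2) := by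
  unfold pvLcs
  dsimp only
  rw [PySem.List.enumerate_eq_map_pyRange a 'A', PySem.List.len_eq,
    PySem.List.pyRange_zero_natCast, List.foldl_map, List.foldl_map]
  have h := pv_range_fold_ind (fun t (st : List Int × Int × Int) =>
      pvLEnc st.1 (pvPr a b t) b.length ∧
      st.2.1 = (pvAbsUpTo a b t).2.2 ∧ st.2.2 = (pvAbsUpTo a b t).1 ∧ 0 ≤ st.2.1)
    (fun st (i0 : Nat) =>
      pvLcsRow b (i0 : Int) (PySem.List.pyGetD a (i0 : Int) 'A') st.1 st.2.1 st.2.2)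
    a.length (List.replicate b.length 0, 0, 0)
    ⟨⟨by simp, by
        intro j0 hj0
        rw [PySem.List.pyGetD_natCast]
        simp [pvPr]⟩, rfl, rfl, by norm_num⟩
    ?_
  · obtain ⟨_, h2, h3, _⟩ := h
    show (_, _) = _
    rw [h2, h3]
    rfl
  · intro t st ht hS
    dsimp only
    obtain ⟨h1, h2, h3, h4⟩ := hS
    have hat : PySem.List.pyGetD a (t : Int) 'A' = a[t] := by
      rw [PySem.List.pyGetD_natCast, List.getD_eq_getElem _ _ ht]
    have hc : a[t]? = some (PySem.List.pyGetD a (t : Int) 'A') := by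
      rw [hat, List.getElem?_eq_getElem ht]
    have hrow := pvLcsRow_eq a b t (PySem.List.pyGetD a (t : Int) 'A') hc st.1 st.2.1 st.2.2 h1 h4
    have hproj := pvAbsRow2_proj a b t b.length (pvAbsUpTo a b t)
    have hst : (st.2.1, st.2.2) = ((pvAbsUpTo a b t).2.2, (pvAbsUpTo a b t).1) := by
      rw [h2, h3]
    refine ⟨?_, ?_, ?_, ?_⟩
    · refine ⟨hrow.1.1, ?_⟩
      intro j hj
      rw [hrow.1.2 j hj]
      simp [pvPr]
    · rw [hrow.2, hst, hproj, pvAbsUpTo_succ]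
    · rw [hrow.2, hst, hproj, pvAbsUpTo_succ]
    · rw [hrow.2, hst, hproj]
      have := pvAbsRowUpTo_nonneg a b t b.length (pvAbsUpTo a b t) (by rw [← h2]; exact h4)
      exact this


-- ===== the abstract loop's result is a maximal, exactly-recorded match =====
def pvGoodRow (a b : List Char) (t s : Nat) (st : Int × Int × Int) : Prop :=
  0 ≤ st.2.2 ∧
  (∀ i j : Nat, (i < t ∧ j < b.length) ∨ (i = t ∧ j < s) → pvDp a b i j ≤ st.2.2) ∧
  (st.2.2 = 0 → st = (0, 0, 0)) ∧
  (0 < st.2.2 → ∃ i j : Nat, ((i < t ∧ j < b.length) ∨ (i = t ∧ j < s)) ∧ i < a.length ∧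
      pvDp a b i j = st.2.2 ∧ st.1 = (i : Int) - st.2.2 + 1 ∧ st.2.1 = (j : Int) - st.2.2 + 1)

def pvGood (a b : List Char) (t : Nat) (st : Int × Int × Int) : Prop :=
  0 ≤ st.2.2 ∧
  (∀ i j : Nat, i < t → j < b.length → pvDp a b i j ≤ st.2.2) ∧
  (st.2.2 = 0 → st = (0, 0, 0)) ∧
  (0 < st.2.2 → ∃ i j : Nat, i < t ∧ j < b.length ∧ i < a.length ∧
      pvDp a b i j = st.2.2 ∧ st.1 = (i : Int) - st.2.2 + 1 ∧ st.2.1 = (j : Int) - st.2.2 + 1)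

theorem pvAbsRowUpTo_good (a b : List Char) (t s : Nat) (ht : t < a.length)
    (st : Int × Int × Int) (hg : pvGoodRow a b t 0 st) :
    pvGoodRow a b t s (pvAbsRowUpTo a b t s st) := by
  unfold pvAbsRowUpTo
  refine pv_range_fold_ind (fun s st => pvGoodRow a b t s st) _ s st hg ?_
  intro s0 st0 _ hp
  obtain ⟨hp1, hp2, hp3, hp4⟩ := hp
  by_cases hlt : st0.2.2 < pvDp a b t s0
  · rw [if_pos hlt]
    refine ⟨by simp only; have := pvDp_nonneg a b t s0; omega, ?_,
      by intro h; exfalso; simp only at h; omega, ?_⟩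
    · intro i j hij
      rcases hij with h | h
      · exact le_of_lt (lt_of_le_of_lt (hp2 i j (Or.inl h)) hlt)
      · rcases Nat.lt_succ_iff_lt_or_eq.mp h.2 with hj | rfl
        · exact le_of_lt (lt_of_le_of_lt (hp2 i j (Or.inr ⟨h.1, hj⟩)) hlt)
        · rw [h.1]
    · intro _
      exact ⟨t, s0, Or.inr ⟨rfl, Nat.lt_succ_self s0⟩, ht, rfl, rfl, rfl⟩
  · rw [if_neg hlt]
    refine ⟨hp1, ?_, hp3, ?_⟩
    · intro i j hij
      rcases hij with h | h
      · exact hp2 i j (Or.inl h)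
      · rcases Nat.lt_succ_iff_lt_or_eq.mp h.2 with hj | rfl
        · exact hp2 i j (Or.inr ⟨h.1, hj⟩)
        · rw [h.1]; omega
    · intro hpos
      obtain ⟨i, j, hreg, hin, hdp, hb1, hb2⟩ := hp4 hpos
      refine ⟨i, j, ?_, hin, hdp, hb1, hb2⟩
      rcases hreg with h | h
      · exact Or.inl h
      · exact Or.inr ⟨h.1, by omega⟩

theorem pvAbsUpTo_good (a b : List Char) (t : Nat) (ht : t ≤ a.length) :
    pvGood a b t (pvAbsUpTo a b t) := by
  unfold pvAbsUpTo
  have h := pv_range_fold_ind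
    (fun t0 st => t0 ≤ a.length → pvGood a b t0 st)
    (fun st i => pvAbsRowUpTo a b i b.length st) t (0, 0, 0)
    (fun _ => ⟨by norm_num, by omega, fun _ => rfl, by norm_num⟩) ?_
  · exact h ht
  · intro t0 st ht0 hp hle
    have hg := hp (by omega)
    have hrow := pvAbsRowUpTo_good a b t0 b.length (by omega) st
      ⟨hg.1, fun i j hij => by
          rcases hij with h | h
          · exact hg.2.1 i j h.1 h.2
          · omega, hg.2.2.1, fun hpos => by
          obtain ⟨i, j, h1, h2, h3, h4, h5, h6⟩ := hg.2.2.2 hpos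
          exact ⟨i, j, Or.inl ⟨h1, h2⟩, h3, h4, h5, h6⟩⟩
    obtain ⟨q1, q2, q3, q4⟩ := hrow
    refine ⟨q1, ?_, q3, ?_⟩
    · intro i j hi hj
      rcases Nat.lt_succ_iff_lt_or_eq.mp hi with hi | rfl
      · exact q2 i j (Or.inl ⟨hi, hj⟩)
      · exact q2 i j (Or.inr ⟨rfl, hj⟩)
    · intro hpos
      obtain ⟨i, j, hreg, hin, hdp, hb1, hb2⟩ := q4 hpos
      rcases hreg with h | h
      · exact ⟨i, j, by omega, h.2, hin, hdp, hb1, hb2⟩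
      · exact ⟨i, j, by omega, h.2, hin, hdp, hb1, hb2⟩

theorem pvGood_no_mtc_sub (a b : List Char) (st : Int × Int × Int) (i j s : Nat)
    (hdp : pvDp a b i j = st.2.2) (hs : (s : Int) = st.2.2) (hpos : 0 < s)
    (hsi : s ≤ i) (hsj : s ≤ j) (hm : pvMtc a b (i - s) (j - s)) : False := by
  have hsub := pvDp_sub a b i j st.2.2 hdp (s - 1) (by omega)
  obtain ⟨_, _, hone⟩ := hsub
  have h1 : pvDp a b (i - (s - 1)) (j - (s - 1)) = 1 := by omega
  have e1 : i - (s - 1) = (i - s) + 1 := by omega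
  have e2 : j - (s - 1) = (j - s) + 1 := by omega
  rw [e1, e2] at h1
  have hm1 : pvMtc a b ((i - s) + 1) ((j - s) + 1) := by
    have := (pvDp_pos_iff a b ((i - s) + 1) ((j - s) + 1)).mp (by omega)
    exact this
  have := pvDp_succ_succ a b (i - s) (j - s) hm1
  have hge : 1 ≤ pvDp a b (i - s) (j - s) := (pvDp_pos_iff a b _ _).mpr hm
  omega

theorem pvExtLeft_noop (a b : List Char) (fuel : Nat) (st : Int × Int × Int)
    (hg : pvGood a b a.length st) : pvExtLeft a b fuel st = st := by
  obtain ⟨bi, bj, sz⟩ := st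
  cases fuel with
  | zero => rfl
  | succ fuel =>
    unfold pvExtLeft
    rw [if_neg]
    rintro ⟨hbi, hbj, hsome, heq⟩
    obtain ⟨hg1, hg2, hg3, hg4⟩ := hg
    by_cases hz : sz = 0
    · have := hg3 (by simpa using hz)
      simp only [Prod.mk.injEq] at this
      omega
    · obtain ⟨i, j, _, _, _, hdp, hb1, hb2⟩ := hg4 (by simp at hg1 ⊢; omega)
      simp only at hb1 hb2 hdp
      have hsz0 : (0:Int) ≤ sz := by simpa using hg1
      set s : Nat := sz.toNat with hsdef
      have hs : (s : Int) = sz := Int.toNat_of_nonneg hsz0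
      have hsi : s ≤ i := by omega
      have hsj : s ≤ j := by omega
      have e1 : bi - 1 = ((i - s : Nat) : Int) := by omega
      have e2 : bj - 1 = ((j - s : Nat) : Int) := by omega
      rw [e1, PySem.List.pyGet?_natCast] at hsome
      rw [e1, e2, PySem.List.pyGet?_natCast, PySem.List.pyGet?_natCast] at heq
      have hm : pvMtc a b (i - s) (j - s) := by
        unfold pvMtc
        rw [heq] at hsome ⊢
        simp [hsome]
      exact pvGood_no_mtc_sub a b (bi, bj, sz) i j s hdp hs (by omega) hsi hsj hm

theorem pvExtRight_noop (a b : List Char) (fuel : Nat) (st : Int × Int × Int)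
    (hg : pvGood a b a.length st) : pvExtRight a b fuel st = st := by
  obtain ⟨bi, bj, sz⟩ := st
  cases fuel with
  | zero => rfl
  | succ fuel =>
    unfold pvExtRight
    rw [if_neg]
    rintro ⟨hbi, hbj, heq⟩
    obtain ⟨hg1, hg2, hg3, hg4⟩ := hg
    by_cases hz : sz = 0
    · have h000 := hg3 (by simpa using hz)
      simp only [Prod.mk.injEq] at h000
      obtain ⟨rfl, rfl, rfl⟩ := h000
      simp only [add_zero] at hbi hbj heq
      have hn : 0 < a.length := by exact_mod_cast hbi
      have hm : 0 < b.length := by exact_mod_cast hbj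
      have e1 : (0 : Int) = ((0 : Nat) : Int) := rfl
      rw [e1, PySem.List.pyGet?_natCast, PySem.List.pyGet?_natCast] at heq
      have hmtc : pvMtc a b 0 0 := by
        unfold pvMtc
        rw [heq, List.getElem?_eq_getElem hm]
        simp
      have hpos00 := (pvDp_pos_iff a b 0 0).mpr hmtc
      have hle00 : pvDp a b 0 0 ≤ 0 := by simpa using hg2 0 0 hn hm
      have := pvDp_nonneg a b 0 0
      omega
    · obtain ⟨i, j, _, hjm, _, hdp, hb1, hb2⟩ := hg4 (by simp at hg1 ⊢; omega)
      simp only at hb1 hb2 hdp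
      have hsz0 : (0:Int) ≤ sz := by simpa using hg1
      have e1 : bi + sz = ((i + 1 : Nat) : Int) := by omega
      have e2 : bj + sz = ((j + 1 : Nat) : Int) := by omega
      rw [e1] at hbi
      rw [e2] at hbj
      rw [e1, e2, PySem.List.pyGet?_natCast, PySem.List.pyGet?_natCast] at heq
      have hin : i + 1 < a.length := by exact_mod_cast hbi
      have hjn : j + 1 < b.length := by exact_mod_cast hbj
      have hmtc : pvMtc a b (i + 1) (j + 1) := by
        unfold pvMtc
        rw [heq, List.getElem?_eq_getElem hjn]
        simp
      have hsucc := pvDp_succ_succ a b i j hmtc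
      have := hg2 (i + 1) (j + 1) hin hjn
      have p1 : ((bi, bj, sz) : Int × Int × Int).1 = bi := rfl
      have p2 : ((bi, bj, sz) : Int × Int × Int).2.1 = bj := rfl
      have p3 : ((bi, bj, sz) : Int × Int × Int).2.2 = sz := rfl
      omega

-- ===== per-segment equality =====
theorem pvFlm_eq (a b : List Char) (hb : pvOkSeg b) : pvFlm a b = pvAbs a b := by
  unfold pvFlm
  rw [pvFlmMain_eq a b hb]
  show pvExtRight a b a.length (pvExtLeft a b (pvAbs a b).1.toNat (pvAbs a b)) = pvAbs a b
  have hg : pvGood a b a.length (pvAbs a b) := pvAbsUpTo_good a b a.length le_rfl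
  have hg2 : 0 ≤ (pvAbs a b).2.2 := hg.1
  rw [pvExtLeft_noop a b _ _ hg, pvExtRight_noop a b _ _ hg]

-- ===== the outer fold over d_segments, in lock-step =====
def pvRel (As : Option (Int × Int × Int) × Int × Option String)
    (Bs : Int × Int × Option String) : Prop :=
  As.2.1 = Bs.2.1 ∧ As.2.2 = Bs.2.2 ∧ 0 ≤ As.2.1 ∧
  (0 < As.2.1 → ∃ mt, As.1 = some mt ∧ mt.1 = Bs.1 ∧ mt.2.2 = As.2.1) ∧
  (As.2.1 = 0 → As.1 = none ∧ As.2.2 = none)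

theorem pv_outer_rel (core : List Char) (d_segments : List (String × String))
    (hpre : ∀ p ∈ d_segments, pvOkSeg p.2.toList) :
    pvRel (d_segments.foldl
        (fun (st : Option (Int × Int × Int) × Int × Option String) nd =>
          if st.2.1 < (pvFlm core nd.2.toList).2.2 then
            (some (pvFlm core nd.2.toList), (pvFlm core nd.2.toList).2.2, some nd.2)
          else st)
        (none, 0, none))
      (d_segments.foldl
        (fun (st : Int × Int × Option String) nd =>
          if st.2.1 < (pvLcs core nd.2.toList).2 then
            ((pvLcs core nd.2.toList).1, (pvLcs core nd.2.toList).2, some nd.2)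
          else st)
        (0, 0, none)) := by
  apply pv_foldl_rel pvRel _ _ d_segments (none, 0, none) (0, 0, none)
  · exact ⟨rfl, rfl, le_refl 0, by norm_num, fun _ => ⟨rfl, rfl⟩⟩
  · intro As Bs nd hmem hR
    obtain ⟨e1, e2, e3, e4, e5⟩ := hR
    have hok : pvOkSeg nd.2.toList := hpre nd hmem
    have hflm : pvFlm core nd.2.toList = pvAbs core nd.2.toList := pvFlm_eq _ _ hok
    have hlcs : pvLcs core nd.2.toList
        = ((pvAbs core nd.2.toList).1, (pvAbs core nd.2.toList).2.2) := pvLcs_eq _ _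
    rw [hflm, hlcs]
    by_cases hlt : As.2.1 < (pvAbs core nd.2.toList).2.2
    · rw [if_pos hlt, if_pos (by rw [← e1]; exact hlt)]
      refine ⟨rfl, rfl, le_of_lt (lt_of_le_of_lt e3 hlt), ?_, ?_⟩
      · intro _
        exact ⟨pvAbs core nd.2.toList, rfl, rfl, rfl⟩
      · intro h
        exfalso
        have h' : (pvAbs core nd.2.toList).2.2 = 0 := h
        omega
    · rw [if_neg hlt, if_neg (by rw [← e1]; exact hlt)]
      exact ⟨e1, e2, e3, e4, e5⟩

-- ===== VERDICT (by name: the statement is the Claim_ definition above) =====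
theorem best_d_alignment_spec : Claim_equal_best_d_alignment := by
  unfold Claim_equal_best_d_alignment
  intro cdr3 cdr3_source d_segments min_v min_j _hdom hpre
  unfold Spec_best_d_alignment best_d_alignment best_d_alignment_alt
  have hrel := pv_outer_rel
    (PySem.List.slice cdr3.toList (some min_v) (some ((cdr3.toList.length : Int) - min_j)))
    d_segments hpre
  set FA := d_segments.foldl
      (fun (st : Option (Int × Int × Int) × Int × Option String) nd =>
        if st.2.1 < (pvFlm (PySem.List.slice cdr3.toList (some min_v)
            (some ((cdr3.toList.length : Int) - min_j))) nd.2.toList).2.2 then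
          (some (pvFlm (PySem.List.slice cdr3.toList (some min_v)
            (some ((cdr3.toList.length : Int) - min_j))) nd.2.toList),
           (pvFlm (PySem.List.slice cdr3.toList (some min_v)
            (some ((cdr3.toList.length : Int) - min_j))) nd.2.toList).2.2, some nd.2)
        else st)
      (none, 0, none) with hFA
  set FB := d_segments.foldl
      (fun (st : Int × Int × Option String) nd =>
        if st.2.1 < (pvLcs (PySem.List.slice cdr3.toList (some min_v)
            (some ((cdr3.toList.length : Int) - min_j))) nd.2.toList).2 then
          ((pvLcs (PySem.List.slice cdr3.toList (some min_v)
            (some ((cdr3.toList.length : Int) - min_j))) nd.2.toList).1,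
           (pvLcs (PySem.List.slice cdr3.toList (some min_v)
            (some ((cdr3.toList.length : Int) - min_j))) nd.2.toList).2, some nd.2)
        else st)
      (0, 0, none) with hFB
  obtain ⟨e1, e2, e3, e4, e5⟩ := hrel
  show (match FA.1 with
      | some mt =>
        if 0 < FA.2.1 then
          (cdr3, String.ofList (PySem.List.slice cdr3_source.toList none (some (min_v + mt.1)) ++
            (PySem.List.slice cdr3_source.toList (some (min_v + mt.1))
              (some (min_v + mt.1 + FA.2.1))).map (fun _ => 'D') ++
            PySem.List.slice cdr3_source.toList (some (min_v + mt.1 + FA.2.1)) none), FA.2.2)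
        else (cdr3, cdr3_source, FA.2.2)
      | none => (cdr3, cdr3_source, FA.2.2))
    = (if 0 < FB.2.1 then
        (cdr3, String.ofList (PySem.List.slice cdr3_source.toList none (some (min_v + FB.1)) ++
          List.replicate (PySem.List.slice cdr3_source.toList (some (min_v + FB.1))
            (some (min_v + FB.1 + FB.2.1))).length 'D' ++
          PySem.List.slice cdr3_source.toList (some (min_v + FB.1 + FB.2.1)) none), FB.2.2)
      else (cdr3, cdr3_source, FB.2.2))
  by_cases hpos : 0 < FA.2.1
  · obtain ⟨mt, hmt, hmt1, hmt2⟩ := e4 hpos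
    rw [hmt]
    simp only []
    rw [if_pos hpos, if_pos (by rw [← e1]; exact hpos), hmt1, ← e1, e2,
      List.map_const']
  · have h0 : FA.2.1 = 0 := by omega
    obtain ⟨hnone, _⟩ := e5 h0
    rw [hnone]
    simp only []
    rw [if_neg (by rw [← e1]; omega), e2]
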